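-- pv_equiv track=rewrite | github.com/BadWolf0081/QuestSearch | util/extra_commands.py | parse_mon_args
-- ===== SOURCE A (Python) =====
-- def parse_mon_args(parts):
--     mon_name = parts[0]
--     form_query = None
--     shiny = False
--     mega = False
--     for part in parts[1:]:
--         if part.lower() == "shiny":
--             shiny = True
--         elif part.lower() == "mega":
--             mega = True
--         else:
--             form_query = part
--     return mon_name, form_query, shiny, mega
-- ===== SOURCE B (Python) =====
-- def parse_mon_args(parts):
--     mon_name = parts[0]
--     tail = parts[1:]
--     shiny = any(p.lower() == "shiny" for p in tail)
--     mega = any(p.lower() == "mega" for p in tail)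
--     forms = [p for p in tail if p.lower() not in ("shiny", "mega")]
--     form_query = forms[-1] if forms else None
--     return mon_name, form_query, shiny, mega
-- ===== Notes on version B (the rewrite author's own statement) =====
-- stated objective: simpler
-- what changed: Replaces the single fused state-machine loop with three independent declarative scans over parts[1:]: shiny/mega via any(), and form_query as the last non-flag part of a filtered list.
import Mathlib
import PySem

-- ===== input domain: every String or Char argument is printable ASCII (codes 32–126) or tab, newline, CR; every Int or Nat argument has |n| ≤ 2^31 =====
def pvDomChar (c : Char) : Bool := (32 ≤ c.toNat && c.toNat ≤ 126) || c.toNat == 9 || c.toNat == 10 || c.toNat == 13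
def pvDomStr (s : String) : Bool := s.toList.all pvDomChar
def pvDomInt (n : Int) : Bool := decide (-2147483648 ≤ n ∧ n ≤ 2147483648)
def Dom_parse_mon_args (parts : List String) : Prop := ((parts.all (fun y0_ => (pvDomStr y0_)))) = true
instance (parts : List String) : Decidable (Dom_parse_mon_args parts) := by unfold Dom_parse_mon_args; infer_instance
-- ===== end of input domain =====

-- B replaces A's single fused loop by three independent scans (any/any/filter + last); objective: simpler.

-- ===== PORT A =====
-- literal port of A: one fold over parts[1:] carrying (form_query, shiny, mega)
def parse_mon_args (parts : List String) : String × Option String × Bool × Bool :=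
  let mon_name := (PySem.List.pyGet? parts 0).getD ""   -- parts[0]; Pre_ excludes the empty list (IndexError)
  let st := (PySem.List.slice parts (some 1) none).foldl
    (fun (st : Option String × Bool × Bool) part =>
      if PySem.Str.lower part = "shiny" then (st.1, true, st.2.2)
      else if PySem.Str.lower part = "mega" then (st.1, st.2.1, true)
      else (some part, st.2.1, st.2.2))
    (none, false, false)
  (mon_name, st.1, st.2.1, st.2.2)

-- ===== PORT B =====
-- literal port of Source B: three independent scans over parts[1:]
def parse_mon_args_alt (parts : List String) : String × Option String × Bool × Bool :=
  let mon_name := (PySem.List.pyGet? parts 0).getD ""   -- parts[0]; Pre_ excludes the empty list (IndexError)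
  let tail := PySem.List.slice parts (some 1) none
  let shiny := tail.any (fun p => PySem.Str.lower p == "shiny")
  let mega := tail.any (fun p => PySem.Str.lower p == "mega")
  let forms := tail.filter (fun p => decide (PySem.Str.lower p ≠ "shiny" ∧ PySem.Str.lower p ≠ "mega"))
  let form_query := forms.getLast?   -- forms[-1] if forms else None
  (mon_name, form_query, shiny, mega)

-- ===== PRECONDITION & SPEC =====
-- both Pythons raise IndexError on the empty list (parts[0]); nothing else raises
def Pre_parse_mon_args (parts : List String) : Prop := parts ≠ []
instance (parts : List String) : Decidable (Pre_parse_mon_args parts) := by unfold Pre_parse_mon_args; infer_instance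
def pvWitness_parse_mon_args : List String := ["Pikachu", "shiny", "alola"]

def Spec_parse_mon_args (parts : List String) (out : String × Option String × Bool × Bool) : Prop := out = parse_mon_args_alt parts
instance (parts : List String) (out : String × Option String × Bool × Bool) : Decidable (Spec_parse_mon_args parts out) := by unfold Spec_parse_mon_args; infer_instance

-- ===== CLAIM (what is proved, stated in full; the proofs are below) =====
def Claim_equal_parse_mon_args : Prop := ∀ (parts : List String), Dom_parse_mon_args parts → Pre_parse_mon_args parts → Spec_parse_mon_args parts (parse_mon_args parts)

-- ===== LEMMAS AND PROOFS =====

theorem getLast?_cons_or {α : Type} (p : α) (l : List α) : (p :: l).getLast? = l.getLast?.or (some p) := by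
  cases l with
  | nil => rfl
  | cons b t =>
    rw [List.getLast?_cons_cons]
    cases hx : (b :: t).getLast? with
    | none => simp [List.getLast?_eq_none_iff] at hx
    | some x => simp [Option.or]

-- A's fold, from any start state, equals B's three scans combined with the start state
theorem loopA_eq (t : List String) (f : Option String) (s m : Bool) :
    t.foldl
      (fun (st : Option String × Bool × Bool) part =>
        if PySem.Str.lower part = "shiny" then (st.1, true, st.2.2)
        else if PySem.Str.lower part = "mega" then (st.1, st.2.1, true)
        else (some part, st.2.1, st.2.2))
      (f, s, m)
    = ((t.filter (fun p => decide (PySem.Str.lower p ≠ "shiny" ∧ PySem.Str.lower p ≠ "mega"))).getLast?.or f,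
       s || t.any (fun p => PySem.Str.lower p == "shiny"),
       m || t.any (fun p => PySem.Str.lower p == "mega")) := by
  induction t generalizing f s m with
  | nil => simp
  | cons p rest ih =>
    by_cases h1 : PySem.Str.lower p = "shiny"
    · simp [List.foldl_cons, h1, ih]
    · by_cases h2 : PySem.Str.lower p = "mega"
      · simp [List.foldl_cons, h2, ih]
      · have e1 : (PySem.Str.lower p == "shiny") = false := by simp [h1]
        have e2 : (PySem.Str.lower p == "mega") = false := by simp [h2]
        simp only [List.foldl_cons, if_neg h1, if_neg h2, ih, List.filter_cons, List.any_cons]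
        simp [h1, h2, e1, e2, getLast?_cons_or]

-- ===== VERDICT (by name: the statement is the Claim_ definition above) =====
theorem parse_mon_args_spec : Claim_equal_parse_mon_args := by
  intro parts _ _
  unfold Spec_parse_mon_args parse_mon_args parse_mon_args_alt
  simp [loopA_eq]
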